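-- pv_equiv track=rewrite | github.com/ekaterinavasenkova/PM-24-6 | lab3/main.py | gr
-- ===== SOURCE A (Python) =====
-- def gr(table1, table2):
--     """Сравнивает значения в первой таблице с значениями во второй на больше."""
--     if table1.keys() != table2.keys():
--         raise ValueError("Таблицы должны иметь одинаковые ключи (названия столбцов).")
--     bool_list = []
--     for i in range(len(list(table1.values())[0])):
--         row_gr = all(table1[key][i] > table2[key][i] for key in table1.keys())
--         bool_list.append(row_gr)
--     return bool_list
-- ===== SOURCE B (Python) =====
-- def gr(table1, table2):
--     """Сравнивает значения в первой таблице с значениями во второй на больше."""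
--     if table1.keys() != table2.keys():
--         raise ValueError("Таблицы должны иметь одинаковые ключи (названия столбцов).")
--     acc = [True] * len(list(table1.values())[0])
--     for key, xs in table1.items():
--         acc = [b and x > y for b, (x, y) in zip(acc, zip(xs, table2[key]))]
--     return acc
-- ===== Notes on version B (the rewrite author's own statement) =====
-- stated objective: alternative
-- what changed: B folds over the keys maintaining a boolean accumulator vector that it ANDs pointwise (via zip, no indexing) with each key's comparison column, instead of A's row-wise pass that rescans every key per row position.
import Mathlib
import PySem

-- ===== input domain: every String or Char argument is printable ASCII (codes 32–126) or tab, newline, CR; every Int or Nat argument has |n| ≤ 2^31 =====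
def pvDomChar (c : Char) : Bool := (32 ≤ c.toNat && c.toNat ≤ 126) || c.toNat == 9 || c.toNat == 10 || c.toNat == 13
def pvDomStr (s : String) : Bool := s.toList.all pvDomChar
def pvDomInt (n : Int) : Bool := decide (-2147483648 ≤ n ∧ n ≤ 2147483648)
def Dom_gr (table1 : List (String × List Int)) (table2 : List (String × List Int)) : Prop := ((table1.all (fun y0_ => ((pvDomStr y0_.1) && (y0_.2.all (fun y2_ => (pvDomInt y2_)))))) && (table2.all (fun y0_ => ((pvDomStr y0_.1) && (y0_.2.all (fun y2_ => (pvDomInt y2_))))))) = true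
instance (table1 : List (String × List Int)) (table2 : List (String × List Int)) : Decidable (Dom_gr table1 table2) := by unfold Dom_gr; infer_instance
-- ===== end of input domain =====

-- B re-implements the row-wise all-greater comparison as a fold over the keys that
-- maintains a boolean accumulator vector, ANDed pointwise (via zip, no indexing) with
-- each key's comparison column (alternative decomposition, same cost).


-- ===== PORT A =====
-- row-wise: for each position i, scan all keys and AND the comparisons
def gr (table1 : List (String × List Int)) (table2 : List (String × List Int)) : List Bool :=
  let n := ((table1.map Prod.snd).headD []).length
  (List.range n).map (fun i =>
    (table1.map Prod.fst).all (fun key =>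
      decide ((((PySem.Dict.ofList table1).getD key ([] : List Int)).getD i (0 : Int)) > (((PySem.Dict.ofList table2).getD key ([] : List Int)).getD i (0 : Int)))))

-- ===== PORT B =====
-- fold over the items: start from a vector of Trues, AND in each key's column by zipping
def gr_alt (table1 : List (String × List Int)) (table2 : List (String × List Int)) : List Bool :=
  List.foldl
    (fun acc kv =>
      (acc.zip (kv.2.zip ((PySem.Dict.ofList table2).getD kv.1 ([] : List Int)))).map
        (fun p => p.1 && decide (p.2.1 > p.2.2)))
    (List.replicate ((table1.map Prod.snd).headD []).length true)
    table1

-- ===== PRECONDITION & SPEC =====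
-- Pre_gr = exactly the inputs where the Python A returns: the tables are genuine dicts
-- (no duplicate keys), have equal key sets (A raises ValueError otherwise), table1 is
-- nonempty (else list(values())[0] raises IndexError) and every row in both tables is at
-- least as long as table1's first row (else table[key][i] raises IndexError).
def Pre_gr (table1 : List (String × List Int)) (table2 : List (String × List Int)) : Prop :=
  (table1.map Prod.fst).Nodup ∧ (table2.map Prod.fst).Nodup ∧
  (∀ k ∈ table1.map Prod.fst, k ∈ table2.map Prod.fst) ∧
  (∀ k ∈ table2.map Prod.fst, k ∈ table1.map Prod.fst) ∧
  table1 ≠ [] ∧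
  (∀ p ∈ table1, ((table1.map Prod.snd).headD []).length ≤ p.2.length) ∧
  (∀ p ∈ table2, ((table1.map Prod.snd).headD []).length ≤ p.2.length)
instance (table1 : List (String × List Int)) (table2 : List (String × List Int)) : Decidable (Pre_gr table1 table2) := by unfold Pre_gr; infer_instance

def pvWitness_gr : (List (String × List Int)) × (List (String × List Int)) :=
  ([("a", [3, 1]), ("b", [5, 0])], [("a", [1, 2]), ("b", [4, -1])])

def Spec_gr (table1 : List (String × List Int)) (table2 : List (String × List Int)) (out : List Bool) : Prop := out = gr_alt table1 table2
instance (table1 : List (String × List Int)) (table2 : List (String × List Int)) (out : List Bool) : Decidable (Spec_gr table1 table2 out) := by unfold Spec_gr; infer_instance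

-- ===== CLAIM (what is proved, stated in full; the proofs are below) =====
def Claim_equal_gr : Prop := ∀ (table1 : List (String × List Int)) (table2 : List (String × List Int)), Dom_gr table1 table2 → Pre_gr table1 table2 → Spec_gr table1 table2 (gr table1 table2)

-- ===== LEMMAS AND PROOFS =====

-- one zip-step of B, applied to an accumulator of shape (range n).map F, ANDs in one column
theorem pv_zip_step (n : ℕ) (F : ℕ → Bool) (xs ys : List Int)
    (hx : n ≤ xs.length) (hy : n ≤ ys.length) :
    (((List.range n).map F).zip (xs.zip ys)).map (fun p => p.1 && decide (p.2.1 > p.2.2))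
      = (List.range n).map (fun i => F i && decide (xs.getD i 0 > ys.getD i 0)) := by
  apply List.ext_getElem
  · simp; omega
  · intro i h1 h2
    have hi : i < n := by simpa using h2
    have hxi : i < xs.length := lt_of_lt_of_le hi hx
    have hyi : i < ys.length := lt_of_lt_of_le hi hy
    simp [List.getElem_zip, List.getD_eq_getElem?_getD, hxi, hyi]

-- Bool 'all' respects pointwise agreement on members
theorem pv_all_congr {α : Type} (l : List α) (p q : α → Bool) (h : ∀ x ∈ l, p x = q x) :
    l.all p = l.all q := by
  induction l with
  | nil => rfl
  | cons hd tl ih =>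
    simp only [List.all_cons, h hd (List.mem_cons_self ..),
      ih (fun x hx => h x (List.mem_cons_of_mem _ hx))]

-- Bool fold of && with seed b is b && all
theorem pv_foldl_and {α : Type} (l : List α) (p : α → Bool) (b : Bool) :
    l.foldl (fun acc x => acc && p x) b = (b && l.all p) := by
  induction l generalizing b with
  | nil => simp
  | cons hd tl ih => simp [List.foldl_cons, ih, Bool.and_assoc]

-- B's fold over rows of sufficient length equals the row-wise map of folds
theorem pv_fold_inv (table2 : List (String × List Int)) (n : ℕ) :
    ∀ (l : List (String × List Int)) (F : ℕ → Bool),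
    (∀ kv ∈ l, n ≤ kv.2.length ∧ n ≤ (((PySem.Dict.ofList table2).getD kv.1 ([] : List Int))).length) →
    List.foldl
      (fun acc kv =>
        (acc.zip (kv.2.zip ((PySem.Dict.ofList table2).getD kv.1 ([] : List Int)))).map
          (fun p => p.1 && decide (p.2.1 > p.2.2)))
      ((List.range n).map F) l
    = (List.range n).map (fun i =>
        l.foldl (fun b kv => b && decide (kv.2.getD i 0 > (((PySem.Dict.ofList table2).getD kv.1 ([] : List Int))).getD i 0)) (F i)) := by
  intro l
  induction l with
  | nil => intro F _; rfl
  | cons hd tl ih =>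
    intro F h
    obtain ⟨h1, h2⟩ := h hd (List.mem_cons_self ..)
    rw [List.foldl_cons, pv_zip_step n F _ _ h1 h2,
        ih _ (fun kv hkv => h kv (List.mem_cons_of_mem _ hkv))]
    simp

-- items of Dict.ofList over nodup keys is the list itself
theorem pv_items_ofList (l : List (String × List Int)) (hnd : (l.map Prod.fst).Nodup) :
    (PySem.Dict.ofList l).items = l := by
  have := PySem.Dict.items_foldl_insert_fresh l Prod.fst Prod.snd PySem.Dict.empty
    (fun a _ => PySem.Dict.contains_empty _) hnd
  simpa using this

-- lookup in Dict.ofList of a nodup table at a member pair's key gives its row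
theorem pv_getD_mem (l : List (String × List Int)) (hnd : (l.map Prod.fst).Nodup)
    (kv : String × List Int) (h : kv ∈ l) :
    (PySem.Dict.ofList l).getD kv.1 ([] : List Int) = kv.2 := by
  apply PySem.Dict.getD_of_mem_items
  · rw [pv_items_ofList l hnd]; exact h
  · exact PySem.Dict.nodup_keys_ofList l

-- ===== VERDICT (by name: the statement is the Claim_ definition above) =====
theorem gr_spec : Claim_equal_gr := by
  intro t1 t2 _ hpre
  obtain ⟨hnd1, hnd2, hsub12, _, _, hlen1, hlen2⟩ := hpre
  unfold Spec_gr gr gr_alt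
  set n := ((t1.map Prod.snd).headD []).length with hn
  have hlen2' : ∀ kv ∈ t1, n ≤ ((PySem.Dict.ofList t2).getD kv.1 ([] : List Int)).length := by
    intro kv hkv
    have hk2 : kv.1 ∈ t2.map Prod.fst := hsub12 kv.1 (List.mem_map_of_mem hkv)
    obtain ⟨p, hp, hpk⟩ := List.mem_map.mp hk2
    have : (PySem.Dict.ofList t2).getD kv.1 ([] : List Int) = p.2 := by
      rw [← hpk]; exact pv_getD_mem t2 hnd2 p hp
    rw [this]; exact hlen2 p hp
  rw [show List.replicate n true = (List.range n).map (fun _ => true) by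
        rw [List.map_const', List.length_range],
      pv_fold_inv t2 n t1 _ (fun kv hkv => ⟨hlen1 kv hkv, hlen2' kv hkv⟩)]
  apply List.map_congr_left
  intro i _
  rw [pv_foldl_and, Bool.true_and, List.all_map]
  apply pv_all_congr
  intro kv hkv
  rw [Function.comp_apply, pv_getD_mem t1 hnd1 kv hkv]
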